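-- pv_equiv track=rewrite | github.com/RaiyanAli275/ProjectFinal | auth-app/backend/models/recommendation_engine.py | _languages_match
-- ===== SOURCE A (Python) =====
-- def _languages_match(book_language, user_language):
--     """Check if book language matches user preference with smart matching"""
--     book_language = book_language.lower().strip()
--     user_language = user_language.lower().strip()
--
--     # Exact match
--     if book_language == user_language:
--         return True
--
--     # Handle common language variations and synonyms
--     language_mappings = {
--         "english": ["en", "eng", "en-us", "en-gb", "english"],
--         "spanish": [
--             "es",
--             "esp",
--             "español",
--             "castellano",
--             "es-es",
--             "es-mx",
--             "spanish",
--         ],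
--         "french": ["fr", "français", "francais", "fr-fr", "french"],
--         "german": ["de", "deutsch", "german", "de-de"],
--         "italian": ["it", "italiano", "it-it", "italian"],
--         "portuguese": [
--             "pt",
--             "português",
--             "portugues",
--             "pt-br",
--             "pt-pt",
--             "portuguese",
--         ],
--         "chinese": ["zh", "chinese", "mandarin", "zh-cn", "zh-tw"],
--         "japanese": ["ja", "japanese", "jp", "ja-jp"],
--         "korean": ["ko", "korean", "kr", "ko-kr"],
--         "russian": ["ru", "russian", "русский", "ru-ru"],
--         "arabic": ["ar", "arabic", "العربية", "ar-sa", "عربي", "عربية"],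
--         "hindi": ["hi", "hindi", "हिन्दी", "hi-in"],
--     }
--
--     # Check if either language contains the other (partial match)
--     if user_language in book_language or book_language in user_language:
--         return True
--
--     # Check language mappings
--     for main_lang, alternatives in language_mappings.items():
--         if (
--             (user_language == main_lang and book_language in alternatives)
--             or (book_language == main_lang and user_language in alternatives)
--             or (user_language in alternatives and book_language in alternatives)
--         ):
--             return True
--
--     return False
-- ===== SOURCE B (Python) =====
-- _LANGUAGE_MAPPINGS = {
--     "english": ["en", "eng", "en-us", "en-gb", "english"],
--     "spanish": ["es", "esp", "español", "castellano", "es-es", "es-mx", "spanish"],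
--     "french": ["fr", "français", "francais", "fr-fr", "french"],
--     "german": ["de", "deutsch", "german", "de-de"],
--     "italian": ["it", "italiano", "it-it", "italian"],
--     "portuguese": ["pt", "português", "portugues", "pt-br", "pt-pt", "portuguese"],
--     "chinese": ["zh", "chinese", "mandarin", "zh-cn", "zh-tw"],
--     "japanese": ["ja", "japanese", "jp", "ja-jp"],
--     "korean": ["ko", "korean", "kr", "ko-kr"],
--     "russian": ["ru", "russian", "русский", "ru-ru"],
--     "arabic": ["ar", "arabic", "العربية", "ar-sa", "عربي", "عربية"],
--     "hindi": ["hi", "hindi", "हिन्दी", "hi-in"],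
-- }
--
-- # Reverse lookup: every alternative token (each main name is listed among its own
-- # alternatives) maps to its group key.  Built once at import time.
-- _GROUP_OF = {alt: main for main, alts in _LANGUAGE_MAPPINGS.items() for alt in alts}
--
--
-- def _languages_match(book_language, user_language):
--     book_language = book_language.lower().strip()
--     user_language = user_language.lower().strip()
--
--     if book_language == user_language:
--         return True
--
--     if user_language in book_language or book_language in user_language:
--         return True
--
--     group = _GROUP_OF.get(book_language)
--     return group is not None and group == _GROUP_OF.get(user_language)
-- ===== Notes on version B (the rewrite author's own statement) =====
-- stated objective: simpler
-- what changed: Replaced the loop over the 12 language groups testing three OR'd membership conditions per group by a single reverse token-to-group dictionary built once; a match is just 'both normalized strings map to the same group', which is equivalent because every main name occurs in its own alternatives list and the token lists are pairwise disjoint.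
import Mathlib
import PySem

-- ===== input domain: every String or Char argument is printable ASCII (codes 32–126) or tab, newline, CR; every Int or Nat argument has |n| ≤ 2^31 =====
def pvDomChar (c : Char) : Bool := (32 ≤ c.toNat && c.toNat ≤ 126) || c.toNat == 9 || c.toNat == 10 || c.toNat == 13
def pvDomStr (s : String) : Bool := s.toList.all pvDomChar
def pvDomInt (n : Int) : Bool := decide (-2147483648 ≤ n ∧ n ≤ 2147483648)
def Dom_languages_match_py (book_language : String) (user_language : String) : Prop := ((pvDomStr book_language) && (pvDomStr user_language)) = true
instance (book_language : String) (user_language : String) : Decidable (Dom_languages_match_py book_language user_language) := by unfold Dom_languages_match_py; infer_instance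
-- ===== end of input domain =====

-- B replaces A's per-group loop of three OR'd membership tests by one reverse
-- token→group dictionary built once: simpler (equal cost at this fixed table size).

-- ===== PORT A =====
-- the language_mappings dict literal of A (insertion order preserved)
def langTable : List (String × List String) :=
  [("english", ["en", "eng", "en-us", "en-gb", "english"]),
   ("spanish", ["es", "esp", "español", "castellano", "es-es", "es-mx", "spanish"]),
   ("french", ["fr", "français", "francais", "fr-fr", "french"]),
   ("german", ["de", "deutsch", "german", "de-de"]),
   ("italian", ["it", "italiano", "it-it", "italian"]),
   ("portuguese", ["pt", "português", "portugues", "pt-br", "pt-pt", "portuguese"]),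
   ("chinese", ["zh", "chinese", "mandarin", "zh-cn", "zh-tw"]),
   ("japanese", ["ja", "japanese", "jp", "ja-jp"]),
   ("korean", ["ko", "korean", "kr", "ko-kr"]),
   ("russian", ["ru", "russian", "русский", "ru-ru"]),
   ("arabic", ["ar", "arabic", "العربية", "ar-sa", "عربي", "عربية"]),
   ("hindi", ["hi", "hindi", "हिन्दी", "hi-in"])]

-- the 'for main_lang, alternatives in language_mappings.items(): if …: return True' loop
def matchLoopA (u b : String) : List (String × List String) → Bool
  | [] => false
  | (g, al) :: rest =>
    if (u == g && al.contains b) || (b == g && al.contains u)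
        || (al.contains u && al.contains b) then true
    else matchLoopA u b rest

def languages_match_py (book_language : String) (user_language : String) : Bool :=
  let b := PySem.Str.strip (PySem.Str.lower book_language)
  let u := PySem.Str.strip (PySem.Str.lower user_language)
  if b == u then true
  else if PySem.Str.isIn u b || PySem.Str.isIn b u then true
  else matchLoopA u b (PySem.Dict.ofList langTable).items

-- ===== PORT B =====
def langTableB : List (String × List String) := langTable

-- _GROUP_OF = {alt: main for main, alts in _LANGUAGE_MAPPINGS.items() for alt in alts}
def groupOf : PySem.Dict String String :=
  langTableB.foldl (fun d p => p.2.foldl (fun d t => d.insert t p.1) d) PySem.Dict.empty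

def languages_match_py_alt (book_language : String) (user_language : String) : Bool :=
  let b := PySem.Str.strip (PySem.Str.lower book_language)
  let u := PySem.Str.strip (PySem.Str.lower user_language)
  if b == u then true
  else if PySem.Str.isIn u b || PySem.Str.isIn b u then true
  else match groupOf.get? b with
    | none => false
    | some g => groupOf.get? u == some g

-- ===== PRECONDITION & SPEC =====
def Spec_languages_match_py (book_language : String) (user_language : String) (out : Bool) : Prop := out = languages_match_py_alt book_language user_language
instance (book_language : String) (user_language : String) (out : Bool) : Decidable (Spec_languages_match_py book_language user_language out) := by unfold Spec_languages_match_py; infer_instance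

-- ===== CLAIM (what is proved, stated in full; the proofs are below) =====
def Claim_equal_languages_match_py : Prop := ∀ (book_language : String) (user_language : String), Dom_languages_match_py book_language user_language → Spec_languages_match_py book_language user_language (languages_match_py book_language user_language)

-- ===== LEMMAS AND PROOFS =====

-- per-group: since the group name occurs in its own alternatives, A's three OR'd
-- conditions collapse to "both strings are in the alternatives list"
lemma cond_simp (u b g : String) (al : List String) (hg : al.contains g = true) :
    ((u == g && al.contains b) || (b == g && al.contains u)
      || (al.contains u && al.contains b))
    = (al.contains u && al.contains b) := by
  have hgm : g ∈ al := by simpa using hg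
  by_cases hum : u ∈ al
  · by_cases hbm : b ∈ al
    · simp [hum, hbm]
    · have hbg : ¬ b = g := fun h => hbm (h ▸ hgm)
      simp [hum, hbm, hbg]
  · have hug : ¬ u = g := fun h => hum (h ▸ hgm)
    simp [hum, hug]

-- if every group in the list misses u or misses b, A's loop returns false
lemma loopA_false (u b : String) (l : List (String × List String))
    (hself : ∀ p ∈ l, p.2.contains p.1 = true)
    (h : ∀ p ∈ l, p.2.contains u = false ∨ p.2.contains b = false) :
    matchLoopA u b l = false := by
  induction l with
  | nil => rfl
  | cons p rest ih =>
    obtain ⟨g, al⟩ := p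
    have hg : al.contains g = true := hself _ (List.mem_cons_self ..)
    have hub : al.contains u = false ∨ al.contains b = false := h _ (List.mem_cons_self ..)
    have hcond : ((u == g && al.contains b) || (b == g && al.contains u)
        || (al.contains u && al.contains b)) = false := by
      rw [cond_simp u b g al hg]
      rcases hub with h' | h' <;> rw [h'] <;> simp
    simp only [matchLoopA, hcond, if_false, Bool.false_eq_true]
    exact ih (fun p hp => hself _ (List.mem_cons_of_mem _ hp))
             (fun p hp => h _ (List.mem_cons_of_mem _ hp))

-- the main loop ↔ first-group characterization
lemma loopA_eq_find (u b : String) (l : List (String × List String))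
    (hself : ∀ p ∈ l, p.2.contains p.1 = true)
    (hnames : (l.map Prod.fst).Nodup)
    (hdisj : l.Pairwise (fun x y => x.2.all (fun t => !(y.2.contains t)) = true)) :
    matchLoopA u b l =
      (match l.find? (fun p => p.2.contains b) with
       | none => false
       | some pb => ((l.find? (fun p => p.2.contains u)).map Prod.fst == some pb.1)) := by
  induction l with
  | nil => rfl
  | cons p rest ih =>
    obtain ⟨g, al⟩ := p
    have hg : al.contains g = true := hself _ (List.mem_cons_self ..)
    have hself' : ∀ q ∈ rest, q.2.contains q.1 = true :=
      fun q hq => hself _ (List.mem_cons_of_mem _ hq)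
    have hnames' : (rest.map Prod.fst).Nodup := (List.nodup_cons.1 (by simpa using hnames)).2
    have hgn : g ∉ rest.map Prod.fst := (List.nodup_cons.1 (by simpa using hnames)).1
    have hdisj' := (List.pairwise_cons.1 hdisj).2
    have hdh : ∀ t, al.contains t = true → ∀ q ∈ rest, q.2.contains t = false := by
      intro t ht q hq
      have h1 := (List.pairwise_cons.1 hdisj).1 q hq
      have htm : t ∈ al := by simpa using ht
      simpa using List.all_eq_true.1 h1 t htm
    simp only [matchLoopA]
    rw [cond_simp u b g al hg]
    by_cases hcu : al.contains u = true
    · by_cases hcb : al.contains b = true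
      · rw [List.find?_cons_of_pos (by simpa using hcb),
            List.find?_cons_of_pos (by simpa using hcu)]
        have hcond : (al.contains u && al.contains b) = true := by rw [hcu, hcb]; rfl
        rw [hcond]
        simp
      · have hcb' : al.contains b = false := by simpa using hcb
        have hL : matchLoopA u b rest = false :=
          loopA_false u b rest hself' (fun q hq => Or.inl (hdh u hcu q hq))
        rw [List.find?_cons_of_neg (by simpa using hcb'),
            List.find?_cons_of_pos (by simpa using hcu)]
        have hcond : (al.contains u && al.contains b) = false := by rw [hcb']; simp
        rw [hcond]
        cases hfb : rest.find? (fun p => p.2.contains b) with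
        | none => simpa using hL
        | some qb =>
          have hqm : qb ∈ rest := List.mem_of_find?_eq_some hfb
          have hne : (g == qb.1) = false := beq_eq_false_iff_ne.2
            (fun h => hgn (h ▸ List.mem_map.2 ⟨qb, hqm, rfl⟩))
          simpa [hne] using hL
    · have hcu' : al.contains u = false := by simpa using hcu
      have hcond : (al.contains u && al.contains b) = false := by rw [hcu']; simp
      rw [hcond]
      by_cases hcb : al.contains b = true
      · have hL : matchLoopA u b rest = false :=
          loopA_false u b rest hself' (fun q hq => Or.inr (hdh b hcb q hq))
        rw [List.find?_cons_of_pos (by simpa using hcb),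
            List.find?_cons_of_neg (by simpa using hcu')]
        cases hfu : rest.find? (fun p => p.2.contains u) with
        | none => simpa using hL
        | some qu =>
          have hqm : qu ∈ rest := List.mem_of_find?_eq_some hfu
          have hne : (qu.1 == g) = false := beq_eq_false_iff_ne.2
            (fun h => hgn (h ▸ List.mem_map.2 ⟨qu, hqm, rfl⟩))
          simpa [hne] using hL
      · have hcb' : al.contains b = false := by simpa using hcb
        rw [List.find?_cons_of_neg (by simpa using hcb'),
            List.find?_cons_of_neg (by simpa using hcu')]
        simpa using ih hself' hnames' hdisj'

-- groupOf, as built by the fold of inserts, is the flat token→group dict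
set_option maxRecDepth 40000 in
lemma groupOf_eq_flat :
    groupOf = PySem.Dict.mk (langTable.flatMap (fun p => p.2.map (fun t => (t, p.1)))) := by
  decide

lemma get?_chunk (s g : String) (al : List String) (rest : List (String × String)) :
    (PySem.Dict.mk (al.map (fun t => (t, g)) ++ rest)).get? s
      = if al.contains s then some g else (PySem.Dict.mk rest).get? s := by
  induction al with
  | nil => simp
  | cons t ts ih =>
    simp only [List.map_cons, List.cons_append, PySem.Dict.get?_mk_cons, ih,
      List.contains_cons]
    by_cases h : s = t
    · subst h; simp
    · simp [h, Ne.symm h]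

lemma get?_flat (s : String) (l : List (String × List String)) :
    (PySem.Dict.mk (l.flatMap (fun p => p.2.map (fun t => (t, p.1))))).get? s
      = (l.find? (fun p => p.2.contains s)).map Prod.fst := by
  induction l with
  | nil => simp [PySem.Dict.get?]
  | cons p rest ih =>
    rw [List.flatMap_cons, get?_chunk, List.find?_cons]
    by_cases h : s ∈ p.2
    · simp [h]
    · simp [h, ih]

lemma langTable_facts :
    (∀ p ∈ langTable, p.2.contains p.1 = true)
    ∧ (langTable.map Prod.fst).Nodup
    ∧ langTable.Pairwise (fun x y => x.2.all (fun t => !(y.2.contains t)) = true) := by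
  refine ⟨?_, ?_, ?_⟩ <;> decide

-- ===== VERDICT (by name: the statement is the Claim_ definition above) =====
theorem languages_match_py_spec : Claim_equal_languages_match_py := by
  intro book user _hd
  unfold Spec_languages_match_py
  have hitems : (PySem.Dict.ofList langTable).items = langTable := by decide
  obtain ⟨hself, hnames, hdisj⟩ := langTable_facts
  have hcore : ∀ u b : String,
      matchLoopA u b (PySem.Dict.ofList langTable).items
        = (match groupOf.get? b with
           | none => false
           | some g => groupOf.get? u == some g) := by
    intro u b
    rw [hitems, loopA_eq_find u b langTable hself hnames hdisj,
      groupOf_eq_flat, get?_flat, get?_flat]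
    cases hfb : langTable.find? (fun p => p.2.contains b) <;> simp
  simp only [languages_match_py, languages_match_py_alt, hcore]
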